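-- pv_equiv track=rewrite | github.com/eric1610/Programming_Practice | CodeJam_2019_Practice_Round/Mural.py | max_beauty_score
-- ===== SOURCE A (Python) =====
-- import math
--
-- def max_beauty_score(beauty_scores, sections):
--     start, end = 0, math.ceil(sections / 2)
--     max_score = sum(beauty_scores[start:end])
--     new_score = max_score
--     for next in range(end, sections):
--         new_score = new_score - beauty_scores[start] + beauty_scores[next]
--         start += 1
--         if new_score > max_score:
--             max_score = new_score
--     return max_score
-- ===== SOURCE B (Python) =====
-- def max_beauty_score(beauty_scores, sections):
--     prefix = [0]
--     for x in beauty_scores: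
--         prefix.append(prefix[-1] + x)
--     w = (sections + 1) // 2
--     return max(prefix[s + w] - prefix[s] for s in range(sections - w + 1))
-- ===== Notes on version B (the rewrite author's own statement) =====
-- stated objective: alternative
-- what changed: Replaces the incremental sliding-window update (running sum minus outgoing plus incoming element) with a prefix-sum table built once and a max over prefix[s+w]-prefix[s] for each window start.
-- outside the precondition, e.g. on max_beauty_score([1, 2, 3], -3): A returns 3, B raises ValueError; on max_beauty_score([], 1): A returns 0, B raises IndexError
import Mathlib
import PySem

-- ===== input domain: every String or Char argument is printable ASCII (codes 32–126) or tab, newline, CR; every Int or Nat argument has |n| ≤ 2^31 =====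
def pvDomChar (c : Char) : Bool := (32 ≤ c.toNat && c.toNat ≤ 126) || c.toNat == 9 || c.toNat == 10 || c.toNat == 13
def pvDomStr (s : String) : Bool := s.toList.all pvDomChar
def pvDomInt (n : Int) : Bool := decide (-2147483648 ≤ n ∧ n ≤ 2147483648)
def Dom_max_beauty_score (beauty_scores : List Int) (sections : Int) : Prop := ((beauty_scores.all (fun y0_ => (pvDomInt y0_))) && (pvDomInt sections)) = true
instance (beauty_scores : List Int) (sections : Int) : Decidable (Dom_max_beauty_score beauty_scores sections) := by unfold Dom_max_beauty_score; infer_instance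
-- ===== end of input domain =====

-- B replaces A's incremental sliding-window update by a prefix-sum table and a max over window endpoint differences (alternative decomposition, same O(n) cost).


-- ===== PORT A =====
-- math.ceil(sections / 2) on an int with |sections| ≤ 2^31 is exact in float arithmetic; it equals -((-sections) // 2)
def max_beauty_score (beauty_scores : List Int) (sections : Int) : Int :=
  let e : Int := -(PySem.Int.floordiv (-sections) 2)
  let max_score : Int := (PySem.List.slice beauty_scores (some 0) (some e)).sum
  let st := (PySem.List.pyRange e sections 1).foldl
    (fun (acc : Int × Int × Int) nxt =>
      let new_score := acc.2.1 - PySem.List.pyGetD beauty_scores acc.1 0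
                         + PySem.List.pyGetD beauty_scores nxt 0
      (acc.1 + 1, new_score, if new_score > acc.2.2 then new_score else acc.2.2))
    (0, max_score, max_score)
  st.2.2

-- ===== PORT B =====
def max_beauty_score_alt (beauty_scores : List Int) (sections : Int) : Int :=
  let pre := beauty_scores.foldl
    (fun acc x => acc ++ [PySem.List.pyGetD acc (-1) 0 + x]) ([0] : List Int)
  let w : Int := PySem.Int.floordiv (sections + 1) 2
  let vals := (PySem.List.pyRange 0 (sections - w + 1) 1).map
    (fun s => PySem.List.pyGetD pre (s + w) 0 - PySem.List.pyGetD pre s 0)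
  (PySem.List.max? vals (fun y => y)).getD 0

-- ===== PRECONDITION & SPEC =====
-- Pre_ excludes sections < 0 (A returns the sum of a negatively-sliced prefix, an artefact of
-- Python slicing; B raises ValueError there) and sections > len(beauty_scores) (A raises
-- IndexError for sections ≥ 2, and for sections = 1 over an empty list returns 0 for a
-- nonexistent window; B raises an exception on all of these).
def Pre_max_beauty_score (beauty_scores : List Int) (sections : Int) : Prop :=
  0 ≤ sections ∧ sections ≤ beauty_scores.length
instance (beauty_scores : List Int) (sections : Int) : Decidable (Pre_max_beauty_score beauty_scores sections) := by unfold Pre_max_beauty_score; infer_instance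
def pvWitness_max_beauty_score : List Int × Int := ([1, -2, 3, 4], 4)

def Spec_max_beauty_score (beauty_scores : List Int) (sections : Int) (out : Int) : Prop := out = max_beauty_score_alt beauty_scores sections
instance (beauty_scores : List Int) (sections : Int) (out : Int) : Decidable (Spec_max_beauty_score beauty_scores sections out) := by unfold Spec_max_beauty_score; infer_instance

-- ===== CLAIM (what is proved, stated in full; the proofs are below) =====
def Claim_equal_max_beauty_score : Prop := ∀ (beauty_scores : List Int) (sections : Int), Dom_max_beauty_score beauty_scores sections → Pre_max_beauty_score beauty_scores sections → Spec_max_beauty_score beauty_scores sections (max_beauty_score beauty_scores sections)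

-- ===== LEMMAS AND PROOFS =====

-- prefix sums of xs: pfun xs i = sum of xs[:i]
def pfun (xs : List Int) (i : Nat) : Int := (xs.take i).sum

-- sum of the window of width w starting at i
def win (xs : List Int) (w i : Nat) : Int := pfun xs (i + w) - pfun xs i

theorem pfun_succ (xs : List Int) (i : Nat) (h : i < xs.length) :
    pfun xs (i + 1) = pfun xs i + xs[i] := by
  simpa [pfun] using List.sum_take_succ xs i h

-- B's prefix list is the table of pfun values
theorem prefix_spec (xs : List Int) :
    xs.foldl (fun acc x => acc ++ [PySem.List.pyGetD acc (-1) 0 + x]) ([0] : List Int)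
      = (List.range (xs.length + 1)).map (pfun xs) := by
  induction xs using List.reverseRecOn with
  | nil => simp [pfun]
  | append_singleton ys x ih =>
      rw [List.foldl_append, ih]
      simp only [List.foldl_cons, List.foldl_nil]
      rw [List.length_append, List.length_singleton]
      conv_rhs => rw [show ys.length + 1 + 1 = (ys.length + 1) + 1 from rfl,
          List.range_succ, List.map_append]
      congr 1
      · apply List.map_congr_left
        intro i hi
        simp only [List.mem_range] at hi
        simp [pfun, List.take_append_of_le_length (by omega : i ≤ ys.length)]
      · rw [PySem.List.pyGetD_neg_ofNat _ 1 0 (by omega) (by simp)]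
        simp [pfun]

-- A's loop, characterised: starting at start = j with new_score = win xs wn j, the final
-- max_score is the running max of the windows j+1 .. j+c over the initial max_score ms
theorem loopA (xs : List Int) (wn : Nat) (hw : 1 ≤ wn) :
    ∀ (c j : Nat) (ms : Int), j + wn + c ≤ xs.length →
    ((PySem.List.pyRange ((j + wn : Nat) : Int) ((j + wn + c : Nat) : Int) 1).foldl
      (fun (acc : Int × Int × Int) nxt =>
        let new_score := acc.2.1 - PySem.List.pyGetD xs acc.1 0
                           + PySem.List.pyGetD xs nxt 0
        (acc.1 + 1, new_score, if new_score > acc.2.2 then new_score else acc.2.2))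
      ((j : Int), win xs wn j, ms)).2.2
    = (List.range c).foldl (fun m i => max m (win xs wn (j + i + 1))) ms := by
  intro c
  induction c with
  | zero =>
      intro j ms h
      simp [PySem.List.pyRange]
  | succ c ih =>
      intro j ms h
      rw [PySem.List.pyRange_one_cons (by push_cast; omega)]
      rw [List.foldl_cons]
      simp only
      have hj : j < xs.length := by omega
      have hjw : j + wn < xs.length := by omega
      have hget1 : PySem.List.pyGetD xs (j : Int) 0 = xs[j] := by
        rw [PySem.List.pyGetD_natCast]; simp [List.getD, hj]
      have hget2 : PySem.List.pyGetD xs ((j + wn : Nat) : Int) 0 = xs[j + wn] := by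
        rw [PySem.List.pyGetD_natCast]; simp [List.getD, hjw]
      have hns : win xs wn j - PySem.List.pyGetD xs (j : Int) 0
          + PySem.List.pyGetD xs ((j + wn : Nat) : Int) 0 = win xs wn (j + 1) := by
        rw [hget1, hget2]
        have h1 := pfun_succ xs j hj
        have h2 := pfun_succ xs (j + wn) hjw
        simp only [win]
        rw [show j + 1 + wn = j + wn + 1 from by omega, h2, h1]
        ring
      rw [hns]
      have hmax : (if win xs wn (j+1) > ms then win xs wn (j+1) else ms)
          = max ms (win xs wn (j+1)) := by
        rw [max_def]; split_ifs <;> omega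
      rw [hmax]
      rw [show ((j + wn : Nat) : Int) + 1 = (((j+1) + wn : Nat) : Int) from by push_cast; omega,
          show ((j + wn + (c+1) : Nat) : Int) = (((j+1) + wn + c : Nat) : Int) from by push_cast; omega,
          show ((j : Nat) : Int) + 1 = (((j+1) : Nat) : Int) from by push_cast; omega,
          ih (j+1) (max ms (win xs wn (j+1))) (by omega)]
      rw [List.range_succ_eq_map, List.foldl_cons, List.foldl_map,
          show j + 0 + 1 = j + 1 from by omega]
      simp only [show ∀ i : Nat, j + 1 + i + 1 = j + (i + 1) + 1 from fun i => by omega]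

-- ===== VERDICT (by name: the statement is the Claim_ definition above) =====
theorem max_beauty_score_spec : Claim_equal_max_beauty_score := by
  intro xs s _ hpre
  obtain ⟨h0, h1⟩ := hpre
  unfold Spec_max_beauty_score
  set sn := s.toNat with hsn
  set n := xs.length with hn
  set wn := (sn + 1) / 2 with hwn
  set c := sn - wn with hc
  have hsnn : sn ≤ n := by omega
  have hA : -(PySem.Int.floordiv (-s) 2) = (wn : Int) := by
    rw [PySem.Int.floordiv_eq_ediv_of_pos (by omega)]; omega
  have hB : PySem.Int.floordiv (s + 1) 2 = (wn : Int) := by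
    rw [PySem.Int.floordiv_eq_ediv_of_pos (by omega)]; omega
  -- evaluate B to the running max of all windows
  have hBval : max_beauty_score_alt xs s
      = (List.range c).foldl (fun m i => max m (win xs wn (i + 1))) (win xs wn 0) := by
    simp only [max_beauty_score_alt]
    rw [hB, prefix_spec,
        show s - (wn : Int) + 1 = ((c + 1 : Nat) : Int) from by omega,
        PySem.List.pyRange_zero_natCast, List.map_map]
    have hmapeq : (List.range (c+1)).map
        ((fun i => PySem.List.pyGetD ((List.range (n + 1)).map (pfun xs)) (i + (wn:Int)) 0
                 - PySem.List.pyGetD ((List.range (n + 1)).map (pfun xs)) i 0) ∘ (fun k : Nat => (k : Int)))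
        = (List.range (c+1)).map (fun i => win xs wn i) := by
      apply List.map_congr_left
      intro i hi
      simp only [List.mem_range] at hi
      simp only [Function.comp]
      rw [show ((i : Int) + (wn : Int)) = ((i + wn : Nat) : Int) from by push_cast; ring,
          PySem.List.pyGetD_natCast, PySem.List.pyGetD_natCast,
          PySem.List.getD_map_range _ _ _ _ (by omega),
          PySem.List.getD_map_range _ _ _ _ (by omega)]
      rfl
    rw [hmapeq]
    rw [List.range_succ_eq_map, List.map_cons, List.map_map, PySem.List.max?_id_cons,
        Option.getD_some, List.foldl_map]
    rfl
  -- evaluate A to the same running max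
  have hms : (PySem.List.slice xs (some 0) (some ((wn : Nat) : Int))).sum = win xs wn 0 := by
    simp only [PySem.List.slice_zero_start, PySem.List.slice_to_natCast]
    simp [win, pfun]
  rw [hBval]
  simp only [max_beauty_score]
  rw [hA, hms, show s = ((sn : Nat) : Int) from by omega]
  rcases Nat.eq_zero_or_pos c with hc0 | hcpos
  · -- no loop iterations: wn = sn, the range is empty
    have hws : wn = sn := by omega
    rw [hc0]
    simp [PySem.List.pyRange, hws]
  · -- at least one iteration forces wn ≥ 1; use the loop invariant
    have hw1 : 1 ≤ wn := by omega
    have hlo := loopA xs wn hw1 c 0 (win xs wn 0) (by omega)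
    simp only [Nat.zero_add, Nat.cast_zero] at hlo
    rw [show ((sn : Nat) : Int) = ((wn + c : Nat) : Int) from by omega]
    exact hlo
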